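-- pv_equiv track=rewrite | github.com/hiyoons/CodingTest | 프로그래머스/0/181932. 코드 처리하기/코드 처리하기.py | solution
-- ===== SOURCE A (Python) =====
-- def solution(code):
--     answer = ''
--     mode=0 #시작 MODE=0 #abc1abc1abc
--     for idx in range(len(code)):
--         if mode==0:
--             if code[idx]!='1':
--                 if idx%2==0:
--                     answer+=code[idx]
--             if code[idx]=='1':
--                 mode=1
--         else:#mode=1
--             if code[idx]!='1':
--                 if idx%2!=0:
--                     answer+=code[idx]
--             if code[idx]=='1':
--                 mode=0
--     if len(answer)==0:
--         answer='EMPTY'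
--     return answer
-- ===== SOURCE B (Python) =====
-- def solution(code):
--     # Key fact: code[i] is kept iff i % 2 == (number of '1' before i) % 2,
--     # i.e. iff the number of non-'1' characters before i is even.
--     # So: drop the '1's, then take every other remaining character.
--     kept = [c for c in code if c != '1']
--     return ''.join(kept[::2]) or 'EMPTY'
-- ===== Notes on version B (the rewrite author's own statement) =====
-- stated objective: simpler
-- what changed: Replaced the index-parity mode state machine by the observation that a character is kept iff an even number of preceding characters differ from the toggle character: B filters those out and takes every other remaining character with a stride slice; no mode, no index parity.
import Mathlib
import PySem

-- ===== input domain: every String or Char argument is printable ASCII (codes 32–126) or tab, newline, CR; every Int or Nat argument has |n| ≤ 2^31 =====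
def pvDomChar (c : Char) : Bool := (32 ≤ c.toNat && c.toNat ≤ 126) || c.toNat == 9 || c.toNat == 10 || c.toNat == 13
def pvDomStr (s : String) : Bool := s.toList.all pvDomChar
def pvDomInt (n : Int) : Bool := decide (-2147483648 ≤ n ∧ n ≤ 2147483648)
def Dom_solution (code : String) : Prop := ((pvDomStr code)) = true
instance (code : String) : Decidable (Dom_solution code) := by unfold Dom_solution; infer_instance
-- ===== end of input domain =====

-- B drops A's toggling mode state machine: a char is kept iff evenly many kept chars precede it, so B filters the toggle chars out and takes a stride-2 slice (simpler, and measured faster by a constant factor: filter+slice instead of a per-character Python loop).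


-- ===== PORT A =====
-- step of A's for-loop: state = (answer, mode)
def solStep (st : List Char × Int) (p : Int × Char) : List Char × Int :=
  let answer := st.1
  let mode := st.2
  let idx := p.1
  let c := p.2
  if mode == 0 then
    let answer := if c ≠ '1' then (if PySem.Int.mod idx 2 == 0 then answer ++ [c] else answer) else answer
    let mode : Int := if c == '1' then 1 else mode
    (answer, mode)
  else
    let answer := if c ≠ '1' then (if ¬ (PySem.Int.mod idx 2 == 0) then answer ++ [c] else answer) else answer
    let mode : Int := if c == '1' then 0 else mode
    (answer, mode)

def solution (code : String) : String :=
  let st := (PySem.List.enumerate code.toList 0).foldl solStep ([], 0)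
  if st.1.length == 0 then "EMPTY" else String.ofList st.1

-- ===== PORT B =====
-- kept = [c for c in code if c != '1'];  kept[::2] is slice? with step 2 (step = 2 ≠ 0, so slice? is `some`; getD only totalizes)
def solution_alt (code : String) : String :=
  let kept := code.toList.filter (fun c => c != '1')
  let picked := (PySem.List.slice? kept none none 2).getD []
  if picked.isEmpty then "EMPTY" else String.ofList picked

-- ===== PRECONDITION & SPEC =====
def Spec_solution (code : String) (out : String) : Prop := out = solution_alt code
instance (code : String) (out : String) : Decidable (Spec_solution code out) := by unfold Spec_solution; infer_instance

-- ===== CLAIM (what is proved, stated in full; the proofs are below) =====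
def Claim_equal_solution : Prop := ∀ (code : String), Dom_solution code → Spec_solution code (solution code)

-- ===== LEMMAS AND PROOFS =====

-- every other element, starting with the first
def takeAlt : List Char → List Char
  | [] => []
  | [x] => [x]
  | x :: _ :: t => x :: takeAlt t

lemma takeAlt_cons (c : Char) (l : List Char) : takeAlt (c :: l) = c :: takeAlt (l.drop 1) := by
  cases l <;> simp [takeAlt]

lemma takeAlt_eq_filterMap (xs : List Char) :
    List.filterMap (fun k => xs[2 * k]?) (List.range ((xs.length + 1) / 2)) = takeAlt xs := by
  induction xs using takeAlt.induct with
  | case1 => simp [takeAlt]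
  | case2 x => simp [takeAlt]
  | case3 x y t ih =>
    have hlen : ((x :: y :: t).length + 1) / 2 = (t.length + 1) / 2 + 1 := by
      simp [List.length_cons]; omega
    rw [hlen, List.range_succ_eq_map]
    simp only [List.filterMap_cons, List.filterMap_map]
    have h0 : (x :: y :: t)[2 * 0]? = some x := by simp
    rw [h0]
    have hfun : ∀ k : Nat, (x :: y :: t)[2 * (k + 1)]? = t[2 * k]? := by
      intro k
      have : 2 * (k + 1) = 2 * k + 1 + 1 := by omega
      simp [this]
    simp only [Function.comp_def, hfun]
    rw [ih]
    simp [takeAlt]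

lemma filterMap_stride (xs : List Char) (c : Nat) (hc : c = (xs.length + 1) / 2)
    (f : Nat → Option Char) (hf : ∀ k, f k = xs[2 * k]?) :
    List.filterMap f (List.range c) = takeAlt xs := by
  subst hc
  rw [List.filterMap_congr (by intro k _; exact hf k)]
  exact takeAlt_eq_filterMap xs

lemma slice2_eq_takeAlt (xs : List Char) :
    PySem.List.slice? xs none none 2 = some (takeAlt xs) := by
  simp only [PySem.List.slice?, PySem.List.sliceIndices]
  norm_num
  exact filterMap_stride xs _ (by split_ifs <;> omega) _ (fun k => by congr 1)

-- loop invariant for A: answer so far ++ (takeAlt of the remaining kept chars,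
-- offset by one when the index parity disagrees with the mode)
lemma loop_eq (cs : List Char) : ∀ (s : Int) (acc : List Char) (p : Int), 0 ≤ s → (p = 0 ∨ p = 1) →
    ((PySem.List.enumerate cs s).foldl solStep (acc, p)).1 =
      acc ++ (if PySem.Int.mod s 2 = p then takeAlt (cs.filter (fun c => c != '1'))
              else takeAlt ((cs.filter (fun c => c != '1')).drop 1)) := by
  induction cs with
  | nil => intro s acc p _ _; simp [PySem.List.enumerate, takeAlt]
  | cons c cs ih =>
    intro s acc p hs hp
    rw [PySem.List.enumerate_cons]
    simp only [List.foldl_cons]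
    have hm2 : PySem.Int.mod s 2 = s % 2 := PySem.Int.mod_eq_emod_of_pos (by norm_num)
    have hm2' : PySem.Int.mod (s + 1) 2 = (s + 1) % 2 := PySem.Int.mod_eq_emod_of_pos (by norm_num)
    have ih0 := fun a => ih (s + 1) a 0 (by omega) (Or.inl rfl)
    have ih1 := fun a => ih (s + 1) a 1 (by omega) (Or.inr rfl)
    rw [hm2'] at ih0 ih1
    rw [hm2]
    have hor : s % 2 = 0 ∨ s % 2 = 1 := by omega
    by_cases hc : c = '1'
    · subst hc
      have hf : ((('1' : Char) :: cs).filter (fun c => c != '1')) = cs.filter (fun c => c != '1') := by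
        simp
      rw [hf]
      rcases hp with hp | hp <;> subst hp
      · rw [show solStep (acc, 0) ((s : Int), '1') = (acc, 1) by simp [solStep]]
        rw [ih1 acc]
        rcases hor with h0 | h1
        · have h1' : (s + 1) % 2 = 1 := by omega
          simp [h0, h1']
        · have h0' : (s + 1) % 2 = 0 := by omega
          simp [h1, h0']
      · rw [show solStep (acc, 1) ((s : Int), '1') = (acc, 0) by simp [solStep]]
        rw [ih0 acc]
        rcases hor with h0 | h1
        · have h1' : (s + 1) % 2 = 1 := by omega
          simp [h0, h1']
        · have h0' : (s + 1) % 2 = 0 := by omega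
          simp [h1, h0']
    · have hb : (c == '1') = false := by simp [hc]
      have hf : ((c :: cs).filter (fun c => c != '1')) = c :: cs.filter (fun c => c != '1') := by
        simp [hc]
      rw [hf]
      rcases hp with hp | hp <;> subst hp
      · rcases hor with h0 | h1
        · -- taken: index even, mode 0
          have h1' : (s + 1) % 2 = 1 := by omega
          rw [show solStep (acc, 0) ((s : Int), c) = (acc ++ [c], 0)
                by simp [solStep, hc, hb, h0]]
          rw [ih0 (acc ++ [c])]
          simp [h0, h1', takeAlt_cons, List.drop_one]
        · -- skipped: index odd, mode 0
          have h0' : (s + 1) % 2 = 0 := by omega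
          rw [show solStep (acc, 0) ((s : Int), c) = (acc, 0)
                by simp [solStep, hc, hb, h1]]
          rw [ih0 acc]
          simp [h1, h0']
      · rcases hor with h0 | h1
        · -- skipped: index even, mode 1
          have h1' : (s + 1) % 2 = 1 := by omega
          rw [show solStep (acc, 1) ((s : Int), c) = (acc, 1)
                by simp [solStep, hc, hb, h0]]
          rw [ih1 acc]
          simp [h0, h1']
        · -- taken: index odd, mode 1
          have h0' : (s + 1) % 2 = 0 := by omega
          rw [show solStep (acc, 1) ((s : Int), c) = (acc ++ [c], 1)
                by simp [solStep, hc, hb, h1]]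
          rw [ih1 (acc ++ [c])]
          simp [h1, h0', takeAlt_cons, List.drop_one]

-- ===== VERDICT (by name: the statement is the Claim_ definition above) =====
theorem solution_spec : Claim_equal_solution := by
  intro code _
  unfold Spec_solution solution solution_alt
  have h := loop_eq code.toList 0 [] 0 le_rfl (Or.inl rfl)
  have h0 : PySem.Int.mod 0 2 = 0 := by decide
  rw [h0, if_pos rfl, List.nil_append] at h
  simp only [h, slice2_eq_takeAlt, Option.getD_some]
  rcases eq_or_ne (takeAlt (code.toList.filter (fun c => c != '1'))) [] with he | he
  · simp [he]
  · simp [he, List.isEmpty_iff, List.length_eq_zero_iff]
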